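-- pv_equiv track=rewrite | github.com/MoYousif4387/job-search-ai-system | crews/agents/resume_writer.py | _highlight_relevant_skills
-- ===== SOURCE A (Python) =====
-- def _highlight_relevant_skills(original_skills, job_requirements):
--     """Reorder and highlight skills relevant to the job"""
--     technical_skills = job_requirements.get("technical_skills", [])
--
--     # Put relevant skills first
--     relevant_skills = []
--     other_skills = []
--
--     for skill in original_skills:
--         if skill.lower() in [req.lower() for req in technical_skills]:
--             relevant_skills.append(skill)
--         else:
--             other_skills.append(skill)
--
--     # Add any required skills that might be missing (if user has them)
--     for req_skill in technical_skills:
--         if req_skill not in [skill.lower() for skill in relevant_skills]: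
--             relevant_skills.append(req_skill.title())
--
--     return relevant_skills + other_skills
-- ===== SOURCE B (Python) =====
-- def _highlight_relevant_skills(original_skills, job_requirements):
--     """Relevant-first reorder via one stable sort; missing required skills appended
--     with an incrementally maintained lowercase 'seen' set instead of rescanning."""
--     technical_skills = job_requirements.get("technical_skills", [])
--     tech_lower = {s.lower() for s in technical_skills}
--     front = sorted(original_skills, key=lambda s: s.lower() not in tech_lower)
--     k = sum(1 for s in original_skills if s.lower() in tech_lower)
--     seen = {s.lower() for s in front[:k]}
--     added = []
--     for req in technical_skills:
--         if req not in seen: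
--             t = req.title()
--             added.append(t)
--             seen.add(t.lower())
--     return front[:k] + added + front[k:]
-- ===== Notes on version B (the rewrite author's own statement) =====
-- stated objective: alternative
-- what changed: A's two-accumulator partition loop is replaced by one stable sort on a boolean relevance key, and A's per-requirement rebuild of the lowercased relevant list is replaced by an incrementally maintained lowercase 'seen' set.
import Mathlib
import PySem

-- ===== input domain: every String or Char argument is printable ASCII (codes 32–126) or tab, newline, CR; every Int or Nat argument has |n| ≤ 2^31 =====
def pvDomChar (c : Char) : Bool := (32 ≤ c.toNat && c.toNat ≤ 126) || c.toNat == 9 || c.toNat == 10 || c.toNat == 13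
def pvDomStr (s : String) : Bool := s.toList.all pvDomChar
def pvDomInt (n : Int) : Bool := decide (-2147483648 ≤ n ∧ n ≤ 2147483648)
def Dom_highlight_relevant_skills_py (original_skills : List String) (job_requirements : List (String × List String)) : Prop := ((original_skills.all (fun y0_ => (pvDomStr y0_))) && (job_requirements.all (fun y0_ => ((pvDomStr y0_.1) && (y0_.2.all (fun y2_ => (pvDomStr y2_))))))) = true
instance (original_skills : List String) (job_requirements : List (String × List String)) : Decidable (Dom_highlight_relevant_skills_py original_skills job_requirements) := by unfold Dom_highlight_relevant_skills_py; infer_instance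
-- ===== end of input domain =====

-- B replaces A's two-accumulator partition pass by one stable sort on a boolean key and
-- A's quadratic rescans (the per-req lowercased-list rebuild) by an incrementally maintained
-- lowercase set; same return value (objective: alternative).

-- str.title(), ported by hand (PySem has no title): exact on the ASCII domain, where a
-- character is cased iff it is a letter — uppercase a letter after a non-letter, lowercase otherwise.
def pvTitleGo (prev : Bool) : List Char → List Char
  | [] => []
  | c :: cs =>
    if PySem.Chars.isalpha c then
      (if prev then PySem.Chars.lowerChar c else PySem.Chars.upperChar c) :: pvTitleGo true cs
    else
      c :: pvTitleGo false cs

def pvTitle (s : String) : String := String.ofList (pvTitleGo false s.toList)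

-- ===== PORT A =====
def highlight_relevant_skills_py (original_skills : List String) (job_requirements : List (String × List String)) : List String :=
  let technical_skills := (PySem.Dict.mk job_requirements).getD "technical_skills" []
  -- for skill in original_skills: append to relevant_skills / other_skills
  let pair := original_skills.foldl
    (fun (acc : List String × List String) skill =>
      if PySem.Str.lower skill ∈ technical_skills.map (fun req => PySem.Str.lower req) then
        (acc.1 ++ [skill], acc.2)
      else
        (acc.1, acc.2 ++ [skill]))
    ([], [])
  -- for req_skill in technical_skills: append req_skill.title() if missing
  let relevant := technical_skills.foldl
    (fun rel req_skill =>
      if req_skill ∈ rel.map (fun skill => PySem.Str.lower skill) then rel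
      else rel ++ [pvTitle req_skill])
    pair.1
  relevant ++ pair.2

-- ===== PORT B =====
def highlight_relevant_skills_py_alt (original_skills : List String) (job_requirements : List (String × List String)) : List String :=
  let technical_skills := (PySem.Dict.mk job_requirements).getD "technical_skills" []
  let tech_lower : PySem.Set String := PySem.Set.ofList (technical_skills.map (fun s => PySem.Str.lower s))
  let front := PySem.List.sorted original_skills (fun s => decide (PySem.Str.lower s ∉ tech_lower)) false
  let k := original_skills.countP (fun s => decide (PySem.Str.lower s ∈ tech_lower))
  let res := technical_skills.foldl
    (fun (acc : PySem.Set String × List String) req =>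
      if req ∉ acc.1 then
        (PySem.Set.add acc.1 (PySem.Str.lower (pvTitle req)), acc.2 ++ [pvTitle req])
      else acc)
    (PySem.Set.ofList ((front.take k).map (fun s => PySem.Str.lower s)), [])
  front.take k ++ res.2 ++ front.drop k

-- ===== PRECONDITION & SPEC =====
def Spec_highlight_relevant_skills_py (original_skills : List String) (job_requirements : List (String × List String)) (out : List String) : Prop := out = highlight_relevant_skills_py_alt original_skills job_requirements
instance (original_skills : List String) (job_requirements : List (String × List String)) (out : List String) : Decidable (Spec_highlight_relevant_skills_py original_skills job_requirements out) := by unfold Spec_highlight_relevant_skills_py; infer_instance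

-- ===== CLAIM (what is proved, stated in full; the proofs are below) =====
def Claim_equal_highlight_relevant_skills_py : Prop := ∀ (original_skills : List String) (job_requirements : List (String × List String)), Dom_highlight_relevant_skills_py original_skills job_requirements → Spec_highlight_relevant_skills_py original_skills job_requirements (highlight_relevant_skills_py original_skills job_requirements)

-- ===== LEMMAS AND PROOFS =====

-- inserting an element whose key is false into (false-block ++ true-block) lands between the blocks
lemma pv_insertBy_split (before : String → String → Bool) (x : String) (A B : List String)
    (hA : ∀ a ∈ A, before x a = false)
    (hB : ∀ b B', B = b :: B' → before x b = true) :
    PySem.List.insertBy before x (A ++ B) = A ++ x :: B := by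
  induction A with
  | nil =>
    cases B with
    | nil => rfl
    | cons b B' => simp [PySem.List.insertBy, hB b B' rfl]
  | cons a A' ih =>
    simp [PySem.List.insertBy, hA a (by simp)]
    exact ih (fun a' ha' => hA a' (by simp [ha']))

lemma pv_foldl_insert_partition (p : String → Bool) (xs A B : List String)
    (hA : ∀ a ∈ A, p a = false) (hB : ∀ b ∈ B, p b = true) :
    xs.foldl (fun acc x => PySem.List.insertBy (fun a b => decide (p a < p b)) x acc) (A ++ B)
      = (A ++ xs.filter (fun x => !p x)) ++ (B ++ xs.filter p) := by
  induction xs generalizing A B with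
  | nil => simp
  | cons x xs ih =>
    by_cases h : p x = true
    · rw [List.foldl_cons,
        PySem.List.insertBy_of_forall_not_before _ x (A ++ B)
          (by intro y _; rw [h]; cases p y <;> decide),
        List.append_assoc A B [x], ih A (B ++ [x]) hA
          (by intro b hb; rcases List.mem_append.1 hb with h' | h'
              · exact hB b h'
              · simp at h'; simpa [h'] using h)]
      simp [h]
    · rw [Bool.not_eq_true] at h
      rw [List.foldl_cons,
        pv_insertBy_split _ x A B
          (by intro a ha; rw [hA a ha, h]; decide)
          (by intro b B' hbB; rw [h, hB b (by simp [hbB])]; decide),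
        show A ++ x :: B = (A ++ [x]) ++ B by simp,
        ih (A ++ [x]) B
          (by intro a ha; rcases List.mem_append.1 ha with h' | h'
              · exact hA a h'
              · simp at h'; simpa [h'] using h)
          hB]
      simp [h]

-- sorted with a boolean key is the stable partition: false-keyed elements first
lemma pv_sorted_bool_partition (p : String → Bool) (xs : List String) :
    PySem.List.sorted xs p false = xs.filter (fun x => !p x) ++ xs.filter p := by
  have := pv_foldl_insert_partition p xs [] [] (by simp) (by simp)
  simpa [PySem.List.sorted_eq_foldl_insertBy] using this

-- A's partition loop is the pair of filters
lemma pv_pair_loop (P : String → Prop) [DecidablePred P] (xs R O : List String) :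
    xs.foldl (fun (acc : List String × List String) s =>
        if P s then (acc.1 ++ [s], acc.2) else (acc.1, acc.2 ++ [s])) (R, O)
      = (R ++ xs.filter (fun s => decide (P s)), O ++ xs.filter (fun s => !decide (P s))) := by
  induction xs generalizing R O with
  | nil => simp
  | cons x xs ih =>
    by_cases h : P x <;> simp [List.foldl_cons, h, ih]

-- A's append-missing loop tracked against B's (seen set, added list) loop
lemma pv_add_loop (tech R0 added : List String) (seen : PySem.Set String)
    (hseen : ∀ x, x ∈ seen ↔ x ∈ (R0 ++ added).map (fun s => PySem.Str.lower s)) :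
    tech.foldl (fun rel req =>
        if req ∈ rel.map (fun skill => PySem.Str.lower skill) then rel
        else rel ++ [pvTitle req]) (R0 ++ added)
      = R0 ++ (tech.foldl (fun (acc : PySem.Set String × List String) req =>
          if req ∉ acc.1 then
            (PySem.Set.add acc.1 (PySem.Str.lower (pvTitle req)), acc.2 ++ [pvTitle req])
          else acc) (seen, added)).2 := by
  induction tech generalizing added seen with
  | nil => simp
  | cons req tech ih =>
    by_cases h : req ∈ seen
    · have hmem : req ∈ (R0 ++ added).map (fun s => PySem.Str.lower s) := (hseen req).1 h
      rw [List.foldl_cons, List.foldl_cons, if_pos hmem, if_neg (not_not_intro h)]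
      exact ih added seen hseen
    · have hmem : req ∉ (R0 ++ added).map (fun s => PySem.Str.lower s) :=
        fun hc => h ((hseen req).2 hc)
      rw [List.foldl_cons, List.foldl_cons, if_neg hmem, if_pos h,
        show R0 ++ added ++ [pvTitle req] = R0 ++ (added ++ [pvTitle req]) by simp]
      exact ih (added ++ [pvTitle req]) _ (by
        intro x
        rw [PySem.Set.mem_add]
        simp [hseen x, or_assoc])

-- the same, started with an empty added-list (B's actual initial state)
lemma pv_add_loop' (tech R0 : List String) (seen : PySem.Set String)
    (hseen : ∀ x, x ∈ seen ↔ x ∈ R0.map (fun s => PySem.Str.lower s)) :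
    tech.foldl (fun rel req =>
        if req ∈ rel.map (fun skill => PySem.Str.lower skill) then rel
        else rel ++ [pvTitle req]) R0
      = R0 ++ (tech.foldl (fun (acc : PySem.Set String × List String) req =>
          if req ∉ acc.1 then
            (PySem.Set.add acc.1 (PySem.Str.lower (pvTitle req)), acc.2 ++ [pvTitle req])
          else acc) (seen, [])).2 := by
  simpa using pv_add_loop tech R0 [] seen (by simpa using hseen)

-- ===== VERDICT (by name: the statement is the Claim_ definition above) =====
theorem highlight_relevant_skills_py_spec : Claim_equal_highlight_relevant_skills_py := by
  intro os jr _
  unfold Spec_highlight_relevant_skills_py highlight_relevant_skills_py highlight_relevant_skills_py_alt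
  dsimp only
  set T := (PySem.Dict.mk jr).getD "technical_skills" [] with hT
  have hkey' : ∀ s : String,
      (decide (PySem.Str.lower s ∉ PySem.Set.ofList (T.map (fun s => PySem.Str.lower s))))
      = !decide (PySem.Str.lower s ∈ T.map (fun req => PySem.Str.lower req)) := by
    intro s
    by_cases hm : PySem.Str.lower s ∈ T.map (fun req => PySem.Str.lower req) <;>
      simp [PySem.Set.mem_ofList, hm]
  have hkey : ∀ s : String,
      (!decide (PySem.Str.lower s ∉ PySem.Set.ofList (T.map (fun s => PySem.Str.lower s))))
      = decide (PySem.Str.lower s ∈ T.map (fun req => PySem.Str.lower req)) := by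
    intro s; rw [hkey', Bool.not_not]
  rw [pv_sorted_bool_partition (fun s => decide (PySem.Str.lower s ∉ PySem.Set.ofList (T.map (fun s => PySem.Str.lower s)))) os,
    pv_pair_loop (fun s => PySem.Str.lower s ∈ T.map (fun req => PySem.Str.lower req)) os [] []]
  simp only [List.nil_append, List.filter_congr (fun s _ => hkey s),
    List.filter_congr (fun s _ => hkey' s)]
  set Rel := os.filter (fun s => decide (PySem.Str.lower s ∈ T.map (fun req => PySem.Str.lower req))) with hRel
  set Oth := os.filter (fun s => !decide (PySem.Str.lower s ∈ T.map (fun req => PySem.Str.lower req))) with hOth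
  have hk : os.countP (fun s => decide (PySem.Str.lower s ∈ PySem.Set.ofList (T.map (fun s => PySem.Str.lower s)))) = Rel.length := by
    rw [List.countP_eq_length_filter, hRel]
    congr 1
    exact List.filter_congr (fun s _ => by simp [PySem.Set.mem_ofList])
  rw [hk, List.take_left, List.drop_left]
  rw [pv_add_loop' T Rel (PySem.Set.ofList (Rel.map (fun s => PySem.Str.lower s)))
    (fun x => by simp [PySem.Set.mem_ofList])]
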